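-- pv_equiv track=rewrite | github.com/helios2k6/python3_interview_questions | eightQueens.py | r
-- ===== SOURCE A (Python) =====
-- def isOnDiag(arr, col, row):
--     posM = -col + row
--     negM = col + row
--
--     for (i, j) in arr:
--         posMij = i - posM
--         negMij = -i + negM
--         if j == posMij or j == negMij:
--             return True
--     return False
--
-- def r(arrangement, l):
--     s = []
--     cols = {}
--     rows = {}
--
--     for (i, j) in arrangement:
--         cols[i] = True
--         rows[j] = True
--
--     for i in range(0, l):
--         if i in cols:
--             continue
--         for j in range(0, l):
--             if j in rows:
--                 continue
--             if isOnDiag(arrangement, i, j):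
--                 continue
--             s.append((i, j))
--     return s
-- ===== SOURCE B (Python) =====
-- def r(arrangement, l):
--     # Precompute attacked columns, rows and the two diagonal families once,
--     # then one flat sweep of the board with O(1) membership tests per cell.
--     cols = {i for (i, j) in arrangement}
--     rows = {j for (i, j) in arrangement}
--     d1 = {j - i for (i, j) in arrangement}   # cell (i, j) hits this family when i - j is in it
--     d2 = {i + j for (i, j) in arrangement}
--     return [(i, j)
--             for i in range(l)
--             for j in range(l)
--             if i not in cols and j not in rows
--             and (i - j) not in d1 and (i + j) not in d2]
-- ===== Notes on version B (the rewrite author's own statement) =====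
-- stated objective: faster
-- what changed: Replaces the per-cell scan of all queens (isOnDiag called for every board cell, plus two bool-dicts) by four precomputed attacked sets (columns, rows, and the two diagonal families keyed by i-j and i+j) so each cell costs O(1) membership tests in one flat comprehension.
import Mathlib
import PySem

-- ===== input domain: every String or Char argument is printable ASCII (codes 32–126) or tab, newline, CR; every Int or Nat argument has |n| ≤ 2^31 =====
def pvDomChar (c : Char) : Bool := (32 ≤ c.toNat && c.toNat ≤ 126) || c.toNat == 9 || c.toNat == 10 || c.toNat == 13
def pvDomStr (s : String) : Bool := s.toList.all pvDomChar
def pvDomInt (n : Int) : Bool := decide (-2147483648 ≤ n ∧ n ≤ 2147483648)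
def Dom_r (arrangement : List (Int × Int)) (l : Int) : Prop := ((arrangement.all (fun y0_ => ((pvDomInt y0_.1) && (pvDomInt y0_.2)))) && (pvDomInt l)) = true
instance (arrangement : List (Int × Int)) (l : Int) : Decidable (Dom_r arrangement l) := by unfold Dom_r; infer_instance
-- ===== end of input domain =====

-- B replaces A's per-cell scan of all queens by four precomputed attacked sets
-- (columns, rows, and the two diagonal families), one membership test each per cell.

-- ===== PORT A =====
-- the for-loop of isOnDiag with its early 'return True'
def isOnDiagLoop (arr : List (Int × Int)) (posM negM : Int) : Bool :=
  match arr with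
  | [] => false
  | (i, j) :: rest =>
      let posMij := i - posM
      let negMij := -i + negM
      if j = posMij ∨ j = negMij then true else isOnDiagLoop rest posM negM

def isOnDiag (arr : List (Int × Int)) (col row : Int) : Bool :=
  let posM := -col + row
  let negM := col + row
  isOnDiagLoop arr posM negM

def r (arrangement : List (Int × Int)) (l : Int) : List (Int × Int) :=
  let cr := arrangement.foldl
      (fun (cr : PySem.Dict Int Bool × PySem.Dict Int Bool) p =>
        (cr.1.insert p.1 true, cr.2.insert p.2 true))
      (PySem.Dict.empty, PySem.Dict.empty)
  let cols := cr.1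
  let rows := cr.2
  (PySem.List.pyRange 0 l 1).foldl
    (fun s i =>
      if cols.contains i then s
      else
        (PySem.List.pyRange 0 l 1).foldl
          (fun s j =>
            if rows.contains j then s
            else if isOnDiag arrangement i j then s
            else s ++ [(i, j)])
          s)
    []

-- ===== PORT B =====
def r_alt (arrangement : List (Int × Int)) (l : Int) : List (Int × Int) :=
  let cols : PySem.Set Int := PySem.Set.ofList (arrangement.map (·.1))
  let rows : PySem.Set Int := PySem.Set.ofList (arrangement.map (·.2))
  let d1 : PySem.Set Int := PySem.Set.ofList (arrangement.map (fun p => p.2 - p.1))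
  let d2 : PySem.Set Int := PySem.Set.ofList (arrangement.map (fun p => p.1 + p.2))
  (PySem.List.pyRange 0 l 1).flatMap (fun i =>
    ((PySem.List.pyRange 0 l 1).filter (fun j =>
        !PySem.Set.contains cols i && !PySem.Set.contains rows j &&
        !PySem.Set.contains d1 (i - j) && !PySem.Set.contains d2 (i + j))).map
      (fun j => (i, j)))

-- ===== PRECONDITION & SPEC =====
def Spec_r (arrangement : List (Int × Int)) (l : Int) (out : List (Int × Int)) : Prop := out = r_alt arrangement l
instance (arrangement : List (Int × Int)) (l : Int) (out : List (Int × Int)) : Decidable (Spec_r arrangement l out) := by unfold Spec_r; infer_instance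

-- ===== CLAIM (what is proved, stated in full; the proofs are below) =====
def Claim_equal_r : Prop := ∀ (arrangement : List (Int × Int)) (l : Int), Dom_r arrangement l → Spec_r arrangement l (r arrangement l)

-- ===== LEMMAS AND PROOFS =====

-- A's single pass over `arrangement` builds the two dicts componentwise
lemma folddicts_split (arr : List (Int × Int)) (c0 r0 : PySem.Dict Int Bool) :
    arr.foldl (fun (cr : PySem.Dict Int Bool × PySem.Dict Int Bool) p =>
        (cr.1.insert p.1 true, cr.2.insert p.2 true)) (c0, r0)
      = (arr.foldl (fun d p => d.insert p.1 true) c0,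
         arr.foldl (fun d p => d.insert p.2 true) r0) := by
  induction arr generalizing c0 r0 with
  | nil => rfl
  | cons p rest ih => simp [ih]

-- membership in a dict built by inserting `f p` for every queen
lemma contains_foldl_insert (f : (Int × Int) → Int) (arr : List (Int × Int))
    (d0 : PySem.Dict Int Bool) (x : Int) :
    (arr.foldl (fun d p => d.insert (f p) true) d0).contains x
      = (d0.contains x || decide (x ∈ arr.map f)) := by
  induction arr generalizing d0 with
  | nil => simp
  | cons p rest ih =>
      simp only [List.foldl_cons, List.map_cons, List.mem_cons, ih,
        PySem.Dict.contains_insert]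
      by_cases hx : x = f p
      · simp [hx]
      · have hb : (x == f p) = false := by simp [hx]
        simp [hb, hx]

-- isOnDiag characterised by the two diagonal families
lemma isOnDiagLoop_eq (arr : List (Int × Int)) (posM negM : Int) :
    isOnDiagLoop arr posM negM
      = decide (∃ p ∈ arr, p.2 = p.1 - posM ∨ p.2 = -p.1 + negM) := by
  induction arr with
  | nil => simp [isOnDiagLoop]
  | cons p rest ih =>
      obtain ⟨i, j⟩ := p
      simp only [isOnDiagLoop, ih]
      by_cases h : j = i - posM ∨ j = -i + negM <;> simp [h]

lemma isOnDiag_eq (arr : List (Int × Int)) (i j : Int) :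
    isOnDiag arr i j
      = (decide ((i - j) ∈ arr.map (fun p => p.2 - p.1)) ||
         decide ((i + j) ∈ arr.map (fun p => p.1 + p.2))) := by
  rw [isOnDiag, isOnDiagLoop_eq, ← Bool.decide_or]
  simp only [decide_eq_decide, List.mem_map]
  constructor
  · rintro ⟨p, hp, h | h⟩
    · exact Or.inl ⟨p, hp, by omega⟩
    · exact Or.inr ⟨p, hp, by omega⟩
  · rintro (⟨p, hp, h⟩ | ⟨p, hp, h⟩)
    · exact ⟨p, hp, Or.inl (by omega)⟩
    · exact ⟨p, hp, Or.inr (by omega)⟩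

-- A's inner loop is a filter+map
lemma inner_foldl (arr : List (Int × Int)) (rows : PySem.Dict Int Bool) (i : Int)
    (R : List Int) (s : List (Int × Int)) :
    R.foldl (fun s j =>
        if rows.contains j then s
        else if isOnDiag arr i j then s
        else s ++ [(i, j)]) s
      = s ++ (R.filter (fun j => !rows.contains j && !isOnDiag arr i j)).map (fun j => (i, j)) := by
  induction R generalizing s with
  | nil => simp
  | cons j rest ih =>
      simp only [List.foldl_cons, List.filter_cons]
      by_cases h1 : rows.contains j <;> by_cases h2 : isOnDiag arr i j <;>
        simp [h1, h2, ih]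

-- A's outer loop is a flatMap over the i's that pass the column test
lemma outer_foldl (R : List Int) (c : Int → Bool) (g : Int → List (Int × Int))
    (s : List (Int × Int)) :
    R.foldl (fun s i => if c i then s else s ++ g i) s
      = s ++ R.flatMap (fun i => if c i then [] else g i) := by
  induction R generalizing s with
  | nil => simp
  | cons i rest ih =>
      simp only [List.foldl_cons, List.flatMap_cons]
      by_cases h : c i <;> simp [h, ih]

-- B's set membership is list membership
lemma contains_ofList_map (f : (Int × Int) → Int) (arr : List (Int × Int)) (x : Int) :
    PySem.Set.contains (PySem.Set.ofList (arr.map f)) x = decide (x ∈ arr.map f) := by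
  by_cases hm : x ∈ arr.map f <;> simp [hm]

-- ===== VERDICT (by name: the statement is the Claim_ definition above) =====
theorem r_spec : Claim_equal_r := by
  intro arrangement l _
  show r arrangement l = r_alt arrangement l
  unfold r r_alt
  rw [folddicts_split]
  simp only [inner_foldl]
  rw [outer_foldl (s := []), List.nil_append]
  apply congrArg (fun f => List.flatMap f (PySem.List.pyRange 0 l 1))
  funext i
  by_cases hc : i ∈ arrangement.map (fun p => p.1)
  · rw [if_pos, eq_comm]
    · rw [List.map_eq_nil_iff, List.filter_eq_nil_iff]
      intro j _
      rw [contains_ofList_map (fun p => p.1)]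
      simp [hc]
    · rw [contains_foldl_insert (fun p => p.1)]
      simp [hc]
  · rw [if_neg]
    · apply congrArg
      apply List.filter_congr
      intro j _
      rw [isOnDiag_eq, contains_foldl_insert (fun p => p.2),
        contains_ofList_map (fun p => p.1), contains_ofList_map (fun p => p.2),
        contains_ofList_map (fun p => p.2 - p.1), contains_ofList_map (fun p => p.1 + p.2)]
      simp only [PySem.Dict.contains_empty, Bool.false_or]
      cases hrow : decide (j ∈ arrangement.map (fun p => p.2)) <;>
        cases hd1 : decide ((i - j) ∈ arrangement.map (fun p => p.2 - p.1)) <;>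
        cases hd2 : decide ((i + j) ∈ arrangement.map (fun p => p.1 + p.2)) <;>
        simp [hc]
    · rw [contains_foldl_insert (fun p => p.1)]
      simp [hc]
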